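-- pv_equiv track=rewrite | github.com/hyunfunfun/Script_drill | 숙제2/11-34.py | getRightmostLowestPoint
-- ===== SOURCE A (Python) =====
-- def getRightmostLowestPoint(points):
--     x=points[0][0]
--     y=points[0][1]
--
--     for i in range(len(points)):
--         if x<points[i][0]:
--             x=points[i][0]
--         if y>points[i][1]:
--             y=points[i][1]
--     return x,y
-- ===== SOURCE B (Python) =====
-- def getRightmostLowestPoint(points):
--     xs = sorted((p[0] for p in points), reverse=True)
--     ys = sorted(p[1] for p in points)
--     return xs[0], ys[0]
-- ===== Notes on version B (the rewrite author's own statement) =====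
-- stated objective: alternative
-- what changed: Replaces the fused comparison loop with sort-then-pick: sorts the x-coordinates descending and the y-coordinates ascending and returns the two heads.
import Mathlib
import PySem

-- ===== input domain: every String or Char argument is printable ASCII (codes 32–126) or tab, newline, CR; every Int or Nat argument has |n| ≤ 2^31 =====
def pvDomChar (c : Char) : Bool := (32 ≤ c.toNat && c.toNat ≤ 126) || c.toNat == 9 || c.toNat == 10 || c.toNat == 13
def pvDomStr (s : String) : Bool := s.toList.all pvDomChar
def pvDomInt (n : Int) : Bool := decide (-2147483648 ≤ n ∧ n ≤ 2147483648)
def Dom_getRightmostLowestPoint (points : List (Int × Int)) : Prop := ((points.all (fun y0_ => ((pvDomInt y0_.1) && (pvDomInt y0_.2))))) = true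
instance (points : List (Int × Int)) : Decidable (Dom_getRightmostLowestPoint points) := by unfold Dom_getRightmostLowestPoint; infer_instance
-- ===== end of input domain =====

-- B replaces A's single fused comparison loop by sort-then-pick (sort xs descending, ys ascending, take the heads); both raise IndexError on the empty list.

-- ===== PORT A =====
def getRightmostLowestPoint (points : List (Int × Int)) : Int × Int :=
  match PySem.List.pyGet? points 0 with
  | none => (0, 0)   -- points[0] raises IndexError on []; excluded by Pre_
  | some p0 =>
    (PySem.List.pyRange 0 (PySem.List.len points) 1).foldl
      (fun (s : Int × Int) i =>
        let pi := PySem.List.pyGetD points i (0, 0)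
        let x := if s.1 < pi.1 then pi.1 else s.1
        let y := if pi.2 < s.2 then pi.2 else s.2
        (x, y)) (p0.1, p0.2)

-- ===== PORT B =====
def getRightmostLowestPoint_alt (points : List (Int × Int)) : Int × Int :=
  let xs := PySem.List.sorted (points.map Prod.fst) (fun v => v) true
  let ys := PySem.List.sorted (points.map Prod.snd) (fun v => v) false
  match PySem.List.pyGet? xs 0, PySem.List.pyGet? ys 0 with
  | some x, some y => (x, y)
  | _, _ => (0, 0)   -- xs[0]/ys[0] raise IndexError on []; excluded by Pre_

-- ===== PRECONDITION & SPEC =====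
-- Pre_ excludes only the empty list, on which both Pythons raise IndexError.
def Pre_getRightmostLowestPoint (points : List (Int × Int)) : Prop := points ≠ []
instance (points : List (Int × Int)) : Decidable (Pre_getRightmostLowestPoint points) := by unfold Pre_getRightmostLowestPoint; infer_instance
def pvWitness_getRightmostLowestPoint : (List (Int × Int)) := [(1, 2), (3, -4)]
def Spec_getRightmostLowestPoint (points : List (Int × Int)) (out : Int × Int) : Prop := out = getRightmostLowestPoint_alt points
instance (points : List (Int × Int)) (out : Int × Int) : Decidable (Spec_getRightmostLowestPoint points out) := by unfold Spec_getRightmostLowestPoint; infer_instance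

-- ===== CLAIM (what is proved, stated in full; the proofs are below) =====
def Claim_equal_getRightmostLowestPoint : Prop := ∀ (points : List (Int × Int)), Dom_getRightmostLowestPoint points → Pre_getRightmostLowestPoint points → Spec_getRightmostLowestPoint points (getRightmostLowestPoint points)

-- ===== LEMMAS AND PROOFS =====

-- A's loop body is the (max, min) step, componentwise.
lemma step_eq (s q : Int × Int) :
    (if s.1 < q.1 then q.1 else s.1, if q.2 < s.2 then q.2 else s.2)
      = (max s.1 q.1, min s.2 q.2) := by
  have h1 : (if s.1 < q.1 then q.1 else s.1) = max s.1 q.1 := by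
    rw [max_def]; split_ifs <;> omega
  have h2 : (if q.2 < s.2 then q.2 else s.2) = min s.2 q.2 := by
    rw [min_def]; split_ifs <;> omega
  rw [h1, h2]

lemma foldl_pair (t : List (Int × Int)) (x y : Int) :
    t.foldl (fun (s : Int × Int) (q : Int × Int) => (max s.1 q.1, min s.2 q.2)) (x, y)
      = ((t.map Prod.fst).foldl max x, (t.map Prod.snd).foldl min y) := by
  induction t generalizing x y with
  | nil => rfl
  | cons q t ih => simpa using ih (max x q.1) (min y q.2)

lemma foldl_max_mem (l : List Int) (x : Int) : l.foldl max x ∈ x :: l := by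
  induction l generalizing x with
  | nil => simp
  | cons a t ih =>
    simp only [List.foldl_cons]
    rcases List.mem_cons.mp (ih (max x a)) with h | h
    · rw [h]; rcases max_choice x a with h' | h' <;> simp [h']
    · simp [h]

lemma le_foldl_max (l : List Int) : ∀ (x y : Int), y ∈ x :: l → y ≤ l.foldl max x := by
  induction l with
  | nil => intro x y hy; simp at hy; simp [hy]
  | cons a t ih =>
    intro x y hy
    simp only [List.foldl_cons]
    have hbase : max x a ≤ List.foldl max (max x a) t := ih (max x a) (max x a) (by simp)
    rcases List.mem_cons.mp hy with rfl | h
    · exact le_trans (le_max_left y a) hbase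
    · rcases List.mem_cons.mp h with rfl | h'
      · exact le_trans (le_max_right x y) hbase
      · exact ih (max x a) y (List.mem_cons_of_mem _ h')

lemma foldl_min_mem (l : List Int) (x : Int) : l.foldl min x ∈ x :: l := by
  induction l generalizing x with
  | nil => simp
  | cons a t ih =>
    simp only [List.foldl_cons]
    rcases List.mem_cons.mp (ih (min x a)) with h | h
    · rw [h]; rcases min_choice x a with h' | h' <;> simp [h']
    · simp [h]

lemma foldl_min_le (l : List Int) : ∀ (x y : Int), y ∈ x :: l → l.foldl min x ≤ y := by
  induction l with
  | nil => intro x y hy; simp at hy; simp [hy]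
  | cons a t ih =>
    intro x y hy
    simp only [List.foldl_cons]
    have hbase : List.foldl min (min x a) t ≤ min x a := ih (min x a) (min x a) (by simp)
    rcases List.mem_cons.mp hy with rfl | h
    · exact le_trans hbase (min_le_left y a)
    · rcases List.mem_cons.mp h with rfl | h'
      · exact le_trans hbase (min_le_right x y)
      · exact ih (min x a) y (List.mem_cons_of_mem _ h')

-- head of the descending sort of a :: t is the foldl-max of t seeded with a
lemma head_sorted_rev_eq_foldl_max (a : Int) (t : List Int) (m : Int) (tl : List Int)
    (h : PySem.List.sorted (a :: t) (fun v => v) true = m :: tl) :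
    m = t.foldl max a := by
  have hmem : m ∈ a :: t := (PySem.List.mem_sorted _ _ _ _).mp (h ▸ List.mem_cons_self)
  have hub : ∀ y ∈ a :: t, y ≤ m := PySem.List.key_head_sorted_rev_ge _ _ h
  have h1 : m ≤ t.foldl max a := le_foldl_max t a m hmem
  have h2 : t.foldl max a ≤ m := hub _ (foldl_max_mem t a)
  omega

lemma head_sorted_eq_foldl_min (a : Int) (t : List Int) (m : Int) (tl : List Int)
    (h : PySem.List.sorted (a :: t) (fun v => v) false = m :: tl) :
    m = t.foldl min a := by
  have hmem : m ∈ a :: t := (PySem.List.mem_sorted _ _ _ _).mp (h ▸ List.mem_cons_self)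
  have hlb : ∀ y ∈ a :: t, m ≤ y := PySem.List.key_head_sorted_le _ _ h
  have h1 : t.foldl min a ≤ m := foldl_min_le t a m hmem
  have h2 : m ≤ t.foldl min a := hlb _ (foldl_min_mem t a)
  omega

-- ===== VERDICT (by name: the statement is the Claim_ definition above) =====
theorem getRightmostLowestPoint_spec : Claim_equal_getRightmostLowestPoint := by
  intro points _ hne
  unfold Spec_getRightmostLowestPoint getRightmostLowestPoint getRightmostLowestPoint_alt
  match points with
  | [] => exact absurd rfl hne
  | p :: t =>
    have hget : PySem.List.pyGet? (p :: t) 0 = some p := by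
      simp [PySem.List.pyGet?, PySem.List.pyIdx?]
    rw [hget]
    simp only
    rw [PySem.List.len_eq]
    rw [PySem.List.foldl_pyRange_zero_pyGetD' (p :: t) (0, 0)
      (fun s q => (if s.1 < q.1 then q.1 else s.1, if q.2 < s.2 then q.2 else s.2)) (p.1, p.2)]
    simp only [List.foldl_cons, step_eq, max_self, min_self]
    rw [foldl_pair]
    -- B side: the two sorted lists are nonempty; name their heads
    have hxs : PySem.List.sorted ((p :: t).map Prod.fst) (fun v => v) true ≠ [] := by
      simp [PySem.List.sorted_eq_nil_iff]
    have hys : PySem.List.sorted ((p :: t).map Prod.snd) (fun v => v) false ≠ [] := by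
      simp [PySem.List.sorted_eq_nil_iff]
    obtain ⟨mx, tx, hx⟩ := List.exists_cons_of_ne_nil hxs
    obtain ⟨my, ty, hy⟩ := List.exists_cons_of_ne_nil hys
    rw [hx, hy]
    simp only [PySem.List.pyGet?_zero_cons]
    have ex : mx = (t.map Prod.fst).foldl max p.1 :=
      head_sorted_rev_eq_foldl_max p.1 (t.map Prod.fst) mx tx (by simpa using hx)
    have ey : my = (t.map Prod.snd).foldl min p.2 :=
      head_sorted_eq_foldl_min p.2 (t.map Prod.snd) my ty (by simpa using hy)
    simp [ex, ey]
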